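-- pv_equiv track=rewrite | github.com/aybekko97/good_repository | thesun/ML/Controller/StringController.py | after
-- ===== SOURCE A (Python) =====
-- def after(given_str, to_find):
--     for i in range(0, len(given_str)):
--         found = True
--         for j in range(0, len(to_find)):
--             if i + j >= len(given_str):
--                 found = False
--                 break
--             if given_str[i + j] != to_find[j]:
--                 found = False
--                 break
--         if found:
--             result = ""
--             for j in range(i + len(to_find), len(given_str)):
--                 result += given_str[j]
--             return result
--     return ""
-- ===== SOURCE B (Python) =====
-- def after(given_str, to_find):
--     i = given_str.find(to_find)
--     if i == -1:
--         return ""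
--     return given_str[i + len(to_find):]
-- ===== Notes on version B (the rewrite author's own statement) =====
-- stated objective: idiomatic
-- what changed: Replaced the hand-rolled O(n*m) scan with nested index loops and character-by-character result building by a single str.find for the first occurrence plus one slice for the suffix.
import Mathlib
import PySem

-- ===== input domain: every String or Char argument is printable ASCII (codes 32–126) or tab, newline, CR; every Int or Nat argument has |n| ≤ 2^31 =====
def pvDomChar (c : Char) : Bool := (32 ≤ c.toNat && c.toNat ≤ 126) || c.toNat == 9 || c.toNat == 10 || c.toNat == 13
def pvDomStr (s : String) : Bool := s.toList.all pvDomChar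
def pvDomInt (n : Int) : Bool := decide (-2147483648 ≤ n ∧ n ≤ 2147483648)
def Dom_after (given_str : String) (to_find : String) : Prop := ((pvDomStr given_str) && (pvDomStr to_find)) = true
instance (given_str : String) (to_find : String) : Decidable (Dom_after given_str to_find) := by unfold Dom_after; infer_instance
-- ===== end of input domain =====

-- B replaces A's hand-rolled nested index loops and character-by-character result building
-- by a single first-occurrence search (str.find) plus one slice; objective: idiomatic.

-- ===== PORT A =====
-- inner loop: for j in range(0, len(to_find)) with the two break conditions; returns the 'found' flag
def afterInner (s t : List Char) (i : Nat) (j : Nat) : Bool :=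
  if _h : j < t.length then
    if s.length ≤ i + j then false
    else if PySem.List.pyGet? s (↑(i + j)) ≠ PySem.List.pyGet? t (↑j) then false
    else afterInner s t i (j + 1)
  else true
termination_by t.length - j

-- result loop: result = ""; for j in range(i + len(to_find), len(given_str)): result += given_str[j]
def afterBuild (s t : List Char) (i : Nat) : List Char :=
  (PySem.List.pyRange (↑(i + t.length)) (PySem.List.len s)).foldl
    (fun acc j => acc ++ [PySem.List.pyGetD s j ' ']) []

-- outer loop: for i in range(0, len(given_str))
def afterOuter (s t : List Char) (i : Nat) : List Char :=
  if _h : i < s.length then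
    if afterInner s t i 0 then afterBuild s t i
    else afterOuter s t (i + 1)
  else []
termination_by s.length - i

def after (given_str : String) (to_find : String) : String :=
  String.ofList (afterOuter given_str.toList to_find.toList 0)

-- ===== PORT B =====
def after_alt (given_str : String) (to_find : String) : String :=
  let i := PySem.Str.find given_str to_find
  if i = -1 then ""
  else PySem.Str.slice given_str (some (i + PySem.Str.len to_find)) none

-- ===== PRECONDITION & SPEC =====
def Spec_after (given_str : String) (to_find : String) (out : String) : Prop := out = after_alt given_str to_find
instance (given_str : String) (to_find : String) (out : String) : Decidable (Spec_after given_str to_find out) := by unfold Spec_after; infer_instance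

-- ===== CLAIM (what is proved, stated in full; the proofs are below) =====
def Claim_equal_after : Prop := ∀ (given_str : String) (to_find : String), Dom_after given_str to_find → Spec_after given_str to_find (after given_str to_find)

-- ===== LEMMAS AND PROOFS =====

lemma afterInner_iff (s t : List Char) (i : Nat) :
    ∀ j, (afterInner s t i j = true ↔ t.drop j <+: s.drop (i + j)) := by
  intro j
  induction hn : t.length - j using Nat.strong_induction_on generalizing j with
  | _ n ih =>
  unfold afterInner
  by_cases hj : j < t.length
  · simp only [hj, dif_pos]
    have htd : t.drop j = t[j] :: t.drop (j+1) := List.drop_eq_getElem_cons hj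
    by_cases hs : s.length ≤ i + j
    · have : s.drop (i+j) = [] := List.drop_eq_nil_of_le hs
      rw [if_pos hs, this, htd]
      constructor
      · intro h; cases h
      · intro h
        have hl := h.length_le
        simp only [List.length_cons, List.length_nil] at hl
        omega
    · push_neg at hs
      have hsd : s.drop (i+j) = s[i+j] :: s.drop (i+j+1) := List.drop_eq_getElem_cons hs
      have h1 : PySem.List.pyGet? s (↑(i + j)) = s[i+j]? := PySem.List.pyGet?_natCast s (i+j)
      have h2 : PySem.List.pyGet? t (↑j) = t[j]? := PySem.List.pyGet?_natCast t j
      rw [htd, hsd]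
      by_cases hne : s[i+j] = t[j]
      · have heq : PySem.List.pyGet? s (↑(i + j)) = PySem.List.pyGet? t (↑j) := by
          rw [h1, h2, List.getElem?_eq_getElem hs, List.getElem?_eq_getElem hj, hne]
        simp only [hs, heq, dif_neg, if_neg, not_le, ne_eq, not_true_eq_false, ite_false,
          not_not, if_pos]
        rw [ih (t.length - (j+1)) (by omega) (j+1) rfl]
        constructor
        · intro h; exact List.cons_prefix_cons.mpr ⟨hne.symm, by simpa [Nat.add_assoc] using h⟩
        · intro h; have := List.cons_prefix_cons.mp h
          simpa [Nat.add_assoc] using this.2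
      · have heq : PySem.List.pyGet? s (↑(i + j)) ≠ PySem.List.pyGet? t (↑j) := by
          rw [h1, h2, List.getElem?_eq_getElem hs, List.getElem?_eq_getElem hj]
          simpa using hne
        simp only [hs, heq, not_le, ne_eq, not_false_eq_true, if_pos, ite_true]
        constructor
        · intro h; exact absurd h (by simp)
        · intro h; exact absurd (List.cons_prefix_cons.mp h).1 (fun he => hne he.symm)
  · simp [hj, List.drop_eq_nil_of_le (Nat.le_of_not_lt hj)]

lemma foldl_append_singleton (l : List Char) (acc : List Char) :
    l.foldl (fun acc c => acc ++ [c]) acc = acc ++ l := by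
  induction l generalizing acc with
  | nil => simp
  | cons c l ih => simp [List.foldl_cons, ih]

lemma afterBuild_eq (s t : List Char) (i : Nat) :
    afterBuild s t i = s.drop (i + t.length) := by
  unfold afterBuild
  rw [PySem.List.foldl_pyRange_pyGetD s ' ' (fun acc c => acc ++ [c]) [] (by positivity)]
  rw [Int.toNat_natCast, foldl_append_singleton]
  simp

lemma afterInner_zero (s t : List Char) (i : Nat) :
    (afterInner s t i 0 = true ↔ t <+: s.drop i) := by
  simpa using afterInner_iff s t i 0

lemma afterOuter_none (s t : List Char) (hno : ∀ j, ¬ t <+: s.drop j) :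
    ∀ n i, s.length - i ≤ n → afterOuter s t i = [] := by
  intro n
  induction n with
  | zero =>
    intro i h
    unfold afterOuter
    rw [dif_neg (by omega)]
  | succ n ih =>
    intro i h
    unfold afterOuter
    by_cases hi : i < s.length
    · rw [dif_pos hi, if_neg, ih (i+1) (by omega)]
      simp only [Bool.not_eq_true]
      rw [← Bool.not_eq_true, afterInner_zero]
      exact hno i
    · rw [dif_neg hi]

lemma afterOuter_found (s t : List Char) (m : Nat) (hm : m < s.length)
    (hpre : t <+: s.drop m) (hmin : ∀ j, j < m → ¬ t <+: s.drop j) :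
    ∀ n i, i ≤ m → m - i ≤ n → afterOuter s t i = afterBuild s t m := by
  intro n
  induction n with
  | zero =>
    intro i hi h
    have : i = m := by omega
    subst this
    unfold afterOuter
    rw [dif_pos hm, if_pos ((afterInner_zero s t i).mpr hpre)]
  | succ n ih =>
    intro i hi h
    by_cases him : i = m
    · subst him
      unfold afterOuter
      rw [dif_pos hm, if_pos ((afterInner_zero s t i).mpr hpre)]
    · unfold afterOuter
      rw [dif_pos (by omega), if_neg, ih (i+1) (by omega) (by omega)]
      simp only [Bool.not_eq_true]
      rw [← Bool.not_eq_true, afterInner_zero]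
      exact hmin i (by omega)

theorem after_eq_alt (g t : String) : after g t = after_alt g t := by
  unfold after after_alt
  by_cases hf : PySem.Chars.find g.toList t.toList = -1
  · have hno : ∀ j, ¬ t.toList <+: g.toList.drop j := by
      intro j hpre
      have hin : PySem.Chars.isIn t.toList g.toList = true :=
        (PySem.Chars.exists_prefix_drop_iff_isIn t.toList g.toList).mp ⟨j, hpre⟩
      exact ((PySem.Chars.find_eq_neg_one_iff g.toList t.toList).mp hf)
        ((PySem.Chars.isIn_iff_infix t.toList g.toList).mp hin)
    rw [afterOuter_none _ _ hno g.toList.length 0 (by omega), PySem.Str.find_eq, if_pos hf]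
  · have h0 : 0 ≤ PySem.Chars.find g.toList t.toList := by
      have := PySem.Chars.neg_one_le_find g.toList t.toList
      omega
    obtain ⟨hpre, hmin⟩ := PySem.Chars.find_spec h0
    rw [PySem.Str.find_eq, if_neg hf, ← String.toList_inj, String.toList_ofList,
      PySem.Str.toList_slice, PySem.Chars.slice_eq_listSlice, PySem.Str.len_eq,
      PySem.List.slice_from g.toList (by omega)]
    have htonat : (PySem.Chars.find g.toList t.toList + ↑t.toList.length).toNat
        = (PySem.Chars.find g.toList t.toList).toNat + t.toList.length := by omega
    rw [htonat]
    by_cases hsnil : g.toList = []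
    · have houter : afterOuter g.toList t.toList 0 = [] := by
        unfold afterOuter
        rw [dif_neg (by simp [hsnil])]
      rw [houter, hsnil]
      simp
    · have hmlt : (PySem.Chars.find g.toList t.toList).toNat < g.toList.length := by
        by_cases htnil : t.toList = []
        · rw [htnil, PySem.Chars.find_nil]
          have : g.toList.length ≠ 0 := by simpa using hsnil
          omega
        · have hle := hpre.length_le
          rw [List.length_drop] at hle
          have h1 : 0 < t.toList.length := List.length_pos_iff.mpr htnil
          omega
      rw [afterOuter_found g.toList t.toList _ hmlt hpre (fun j hj => hmin j hj)
        ((PySem.Chars.find g.toList t.toList).toNat) 0 (by omega) (by omega), afterBuild_eq]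

-- ===== VERDICT (by name: the statement is the Claim_ definition above) =====
theorem after_spec : Claim_equal_after := by
  intro g t _
  unfold Spec_after
  exact after_eq_alt g t
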